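-- pv_equiv track=rewrite | github.com/DevashishPathrabe/LeetCode | LeetCode Solutions/Problems/809. Expressive Words.py | check
-- ===== SOURCE A (Python) =====
-- def check(s, x):
--         i = j = 0
--         while i < len(s) and j < len(x):
--             counts = 1
--             while i < len(s) - 1 and s[i] == s[i+1]:
--                 i += 1
--                 counts += 1
--             countx = 1
--             while j < len(x)-1 and x[j] == x[j+1]:
--                 j += 1
--                 countx += 1
--             if s[i] != x[j]:
--                 return 0
--             i += 1
--             j += 1
--             if counts < countx:
--                 return 0
--             if countx == counts:
--                 continue
--             if counts <= 2:
--                 return 0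
--         return 1 if i >= len(s) and j >= len(x) else 0
-- ===== SOURCE B (Python) =====
-- def check(s, x):
--     # Greedy single forward pass over s: consume a char of x when it matches,
--     # otherwise allow the position only if it sits inside a run of >= 3 equal chars.
--     j = 0
--     for i in range(len(s)):
--         if j < len(x) and s[i] == x[j]:
--             j += 1
--         elif i >= 2 and s[i] == s[i-1] == s[i-2]:
--             continue
--         elif 1 <= i and i + 1 < len(s) and s[i-1] == s[i] == s[i+1]:
--             continue
--         else:
--             return 0
--     return 1 if j == len(x) else 0
-- ===== Notes on version B (the rewrite author's own statement) =====
-- stated objective: alternative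
-- what changed: Replaces A's run-counting two-pointer scan (nested while-loops that measure each run's length in s and x and compare the counts) with a greedy single forward for-loop over s that consumes one char of x on a match and otherwise only tests a local window of three equal chars of s, never computing run lengths.
import Mathlib
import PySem

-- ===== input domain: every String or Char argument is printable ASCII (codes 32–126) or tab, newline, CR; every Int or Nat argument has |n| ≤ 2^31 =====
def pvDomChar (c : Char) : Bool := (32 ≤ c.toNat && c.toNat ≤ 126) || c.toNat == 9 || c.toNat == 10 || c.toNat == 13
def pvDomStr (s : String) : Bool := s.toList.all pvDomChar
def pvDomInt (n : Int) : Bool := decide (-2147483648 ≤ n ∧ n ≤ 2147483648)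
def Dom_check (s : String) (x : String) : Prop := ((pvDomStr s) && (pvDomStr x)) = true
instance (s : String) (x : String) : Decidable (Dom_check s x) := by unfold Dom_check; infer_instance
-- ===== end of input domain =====

-- B replaces A's run-counting two-pointer scan by a greedy single forward pass over s that
-- consumes one char of x on a match and otherwise only tests a local 3-window of s (objective: alternative).

-- ===== PORT A =====
-- inner while loop: 'while i < len(s)-1 and s[i]==s[i+1]: i += 1; counts += 1'
-- (fuel = cs.length always suffices: the index strictly increases and stays below cs.length)
def runA (cs : List Char) : Nat → Nat → Nat → Nat × Nat
  | 0, i, c => (i, c)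
  | fuel+1, i, c =>
      if i + 1 < cs.length ∧ cs.getD i ' ' = cs.getD (i+1) ' ' then
        runA cs fuel (i+1) (c+1)
      else (i, c)

-- outer while loop of A, over indices i into s and j into x
-- (fuel = s.length + 1 always suffices: i strictly increases each iteration)
def outerA (s x : List Char) : Nat → Nat → Nat → Int
  | 0, _, _ => 0
  | fuel+1, i, j =>
      if i < s.length ∧ j < x.length then
        let p := runA s s.length i 1
        let q := runA x x.length j 1
        if s.getD p.1 ' ' ≠ x.getD q.1 ' ' then 0
        else if p.2 < q.2 then 0
        else if q.2 = p.2 then outerA s x fuel (p.1 + 1) (q.1 + 1)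
        else if p.2 ≤ 2 then 0
        else outerA s x fuel (p.1 + 1) (q.1 + 1)
      else if s.length ≤ i ∧ x.length ≤ j then 1 else 0

def check (s : String) (x : String) : Int :=
  outerA s.toList x.toList (s.toList.length + 1) 0 0

-- ===== PORT B =====
-- B's for-loop over i in range(len(s)) with early 'return 0', carrying the pointer j into x;
-- the recursion is structural on the not-yet-scanned suffix of s (rem = s.drop i)
def greedyGo (s x : List Char) : List Char → Nat → Nat → Int
  | [], _, j => if j = x.length then 1 else 0
  | _ :: rem, i, j =>
      if j < x.length ∧ s.getD i ' ' = x.getD j ' ' then greedyGo s x rem (i+1) (j+1)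
      else if 2 ≤ i ∧ s.getD i ' ' = s.getD (i-1) ' ' ∧ s.getD (i-1) ' ' = s.getD (i-2) ' ' then
        greedyGo s x rem (i+1) j
      else if 1 ≤ i ∧ i + 1 < s.length ∧ s.getD (i-1) ' ' = s.getD i ' ' ∧ s.getD i ' ' = s.getD (i+1) ' ' then
        greedyGo s x rem (i+1) j
      else 0

def check_alt (s : String) (x : String) : Int := greedyGo s.toList x.toList s.toList 0 0

-- ===== PRECONDITION & SPEC =====
def Spec_check (s : String) (x : String) (out : Int) : Prop := out = check_alt s x
instance (s : String) (x : String) (out : Int) : Decidable (Spec_check s x out) := by unfold Spec_check; infer_instance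

-- ===== CLAIM (what is proved, stated in full; the proofs are below) =====
def Claim_equal_check : Prop := ∀ (s : String) (x : String), Dom_check s x → Spec_check s x (check s x)

-- ===== LEMMAS AND PROOFS =====

-- run-length encoding (proof device: both programs are related to the run comparison cmpB)
def rle (cs : List Char) : List (Char × Nat) :=
  match cs with
  | [] => []
  | c :: rest =>
      (c, 1 + (rest.takeWhile (· == c)).length) :: rle (rest.dropWhile (· == c))
termination_by cs.length
decreasing_by
  have := List.length_dropWhile_le (· == c) rest
  simp; omega

-- aligned comparison of two run lists
def cmpB : List (Char × Nat) → List (Char × Nat) → Int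
  | [], [] => 1
  | g :: gs, h :: hs =>
      if g.1 = h.1 ∧ h.2 ≤ g.2 ∧ (g.2 = h.2 ∨ 3 ≤ g.2) then cmpB gs hs else 0
  | _ :: _, [] => 0
  | [], _ :: _ => 0

theorem drop_tw (p : Char → Bool) : ∀ (l : List Char),
    l.drop (l.takeWhile p).length = l.dropWhile p
  | [] => rfl
  | a :: l => by
      by_cases h : p a <;>
        simp [h, drop_tw p l]

theorem get_run : ∀ (rest : List Char) (a : Char) (t : Nat),
    t ≤ (rest.takeWhile (· == a)).length → (a :: rest)[t]? = some a
  | _, _, 0, _ => by simp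
  | [], _, _+1, ht => by simp at ht
  | b :: rest', a, t+1, ht => by
      by_cases hab : b = a
      · subst hab
        simp only [List.takeWhile_cons, beq_self_eq_true, if_true, List.length_cons] at ht
        simpa using get_run rest' b t (by omega)
      · have hf : (b == a) = false := by simpa using hab
        simp [hf] at ht

theorem getD_run_list (rest : List Char) (a : Char) (t : Nat)
    (ht : t ≤ (rest.takeWhile (· == a)).length) : (a :: rest).getD t ' ' = a := by
  rw [List.getD_eq_getElem?_getD, get_run rest a t ht]
  rfl

theorem getD_drop (s l : List Char) (i k : Nat) (h : s.drop i = l) :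
    s.getD (i + k) ' ' = l.getD k ' ' := by
  rw [List.getD_eq_getElem?_getD, List.getD_eq_getElem?_getD, ← List.getElem?_drop, h]

theorem dropWhile_getD_ne (a : Char) : ∀ (l : List Char),
    l.dropWhile (· == a) ≠ [] → (l.dropWhile (· == a)).getD 0 ' ' ≠ a
  | [], h => absurd rfl h
  | c :: l, h => by
      by_cases hc : (c == a) = true
      · rw [List.dropWhile_cons] at h ⊢
        simp only [hc, if_true] at h ⊢
        exact dropWhile_getD_ne a l h
      · have hf : (c == a) = false := by simpa using hc
        have hne : c ≠ a := by simpa using hf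
        simp [hf, hne]

theorem runA_spec : ∀ (rest : List Char) (cs : List Char) (fuel i c : Nat) (a : Char),
    cs.drop i = a :: rest → (rest.takeWhile (· == a)).length ≤ fuel →
    runA cs fuel i c = (i + (rest.takeWhile (· == a)).length, c + (rest.takeWhile (· == a)).length)
  | [], cs, fuel, i, c, a, h, _ => by
      have hlen : (cs.drop i).length = cs.length - i := List.length_drop ..
      rw [h] at hlen
      have hi : i < cs.length := by
        by_contra hh
        have h2 : cs.drop i = [] := List.drop_eq_nil_of_le (by omega)
        rw [h2] at h; simp at h
      cases fuel with
      | zero => simp [runA]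
      | succ fuel =>
          rw [runA, if_neg (by simp at hlen ⊢; omega)]
          simp
  | b :: rest', cs, fuel, i, c, a, h, hfuel => by
      have hlen : (cs.drop i).length = cs.length - i := List.length_drop ..
      rw [h] at hlen
      have hi1 : i + 1 < cs.length := by simp at hlen; omega
      have hga : cs.getD i ' ' = a := by
        have := getD_drop cs (a :: b :: rest') i 0 h
        simpa using this
      have hgb : cs.getD (i + 1) ' ' = b := by
        have := getD_drop cs (a :: b :: rest') i 1 h
        simpa using this
      have hdrop1 : cs.drop (i + 1) = b :: rest' := by
        have h0 : List.drop 1 (cs.drop i) = cs.drop (i + 1) := List.drop_drop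
        rw [h] at h0
        simpa using h0.symm
      by_cases hab : a = b
      · subst hab
        have htw : (List.takeWhile (· == a) (a :: rest')).length
            = (List.takeWhile (· == a) rest').length + 1 := by
          simp
        obtain ⟨fuel', rfl⟩ : ∃ f, fuel = f + 1 := by
          rcases fuel with _ | f
          · rw [htw] at hfuel; omega
          · exact ⟨f, rfl⟩
        rw [runA, if_pos ⟨hi1, by rw [hga, hgb]⟩,
          runA_spec rest' cs fuel' (i+1) (c+1) a hdrop1 (by rw [htw] at hfuel; omega)]
        simp
        constructor <;> omega
      · have hf : (b == a) = false := by simp; exact fun hc => hab hc.symm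
        cases fuel with
        | zero => simp [runA, hf]
        | succ fuel =>
            rw [runA, if_neg (by rw [hga, hgb]; exact fun hc => hab hc.2)]
            simp [hf]

-- the element A inspects at the end of a run is the run's character
theorem getD_run (cs : List Char) (i : Nat) (a : Char) (rest : List Char)
    (h : cs.drop i = a :: rest) :
    cs.getD (i + (rest.takeWhile (· == a)).length) ' ' = a := by
  rw [getD_drop cs (a :: rest) i _ h, getD_run_list rest a _ (le_refl _)]

theorem outer_eq (s x : List Char) : ∀ (fuel i j : Nat), s.length - i < fuel →
    outerA s x fuel i j = cmpB (rle (s.drop i)) (rle (x.drop j))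
  | 0, i, j, hf => absurd hf (by omega)
  | fuel+1, i, j, hf => by
    rw [outerA]
    split
    next hij =>
      obtain ⟨hi, hj⟩ := hij
      obtain ⟨a, rs, hs⟩ : ∃ a rs, s.drop i = a :: rs := by
        cases h : s.drop i with
        | nil =>
            exfalso
            have hl : (s.drop i).length = s.length - i := List.length_drop ..
            rw [h] at hl; simp at hl; omega
        | cons a rs => exact ⟨a, rs, rfl⟩
      obtain ⟨b, rx, hx⟩ : ∃ b rx, x.drop j = b :: rx := by
        cases h : x.drop j with
        | nil =>
            exfalso
            have hl : (x.drop j).length = x.length - j := List.length_drop ..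
            rw [h] at hl; simp at hl; omega
        | cons b rx => exact ⟨b, rx, rfl⟩
      have hlenS : (s.drop i).length = s.length - i := List.length_drop ..
      rw [hs] at hlenS
      simp only [List.length_cons] at hlenS
      have hlenX : (x.drop j).length = x.length - j := List.length_drop ..
      rw [hx] at hlenX
      simp only [List.length_cons] at hlenX
      have hKs : (rs.takeWhile (· == a)).length ≤ rs.length :=
        (List.takeWhile_prefix _).length_le
      have hKx : (rx.takeWhile (· == b)).length ≤ rx.length :=
        (List.takeWhile_prefix _).length_le
      rw [runA_spec rs s s.length i 1 a hs (by omega),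
        runA_spec rx x x.length j 1 b hx (by omega)]
      dsimp only
      have hdropS : s.drop (i + (rs.takeWhile (· == a)).length + 1) = rs.dropWhile (· == a) := by
        have h1 : List.drop ((rs.takeWhile (· == a)).length + 1) (s.drop i)
            = s.drop (i + ((rs.takeWhile (· == a)).length + 1)) := List.drop_drop
        rw [hs] at h1
        simp only [List.drop_succ_cons] at h1
        rw [show i + (rs.takeWhile (· == a)).length + 1
              = i + ((rs.takeWhile (· == a)).length + 1) by omega, ← h1, drop_tw]
      have hdropX : x.drop (j + (rx.takeWhile (· == b)).length + 1) = rx.dropWhile (· == b) := by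
        have h1 : List.drop ((rx.takeWhile (· == b)).length + 1) (x.drop j)
            = x.drop (j + ((rx.takeWhile (· == b)).length + 1)) := List.drop_drop
        rw [hx] at h1
        simp only [List.drop_succ_cons] at h1
        rw [show j + (rx.takeWhile (· == b)).length + 1
              = j + ((rx.takeWhile (· == b)).length + 1) by omega, ← h1, drop_tw]
      have hrec : outerA s x fuel (i + (rs.takeWhile (· == a)).length + 1)
            (j + (rx.takeWhile (· == b)).length + 1)
          = cmpB (rle (rs.dropWhile (· == a))) (rle (rx.dropWhile (· == b))) := by
        rw [outer_eq s x fuel (i + (rs.takeWhile (· == a)).length + 1)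
              (j + (rx.takeWhile (· == b)).length + 1) (by omega), hdropS, hdropX]
      have hrleS : rle (s.drop i)
          = (a, 1 + (rs.takeWhile (· == a)).length) :: rle (rs.dropWhile (· == a)) := by
        rw [hs, rle]
      have hrleX : rle (x.drop j)
          = (b, 1 + (rx.takeWhile (· == b)).length) :: rle (rx.dropWhile (· == b)) := by
        rw [hx, rle]
      rw [hrleS, hrleX, getD_run s i a rs hs, getD_run x j b rx hx]
      by_cases hab : a = b
      · subst hab
        rw [if_neg (by simp)]
        by_cases h1 : 1 + (rs.takeWhile (· == a)).length < 1 + (rx.takeWhile (· == a)).length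
        · rw [if_pos h1, cmpB, if_neg (by omega)]
        · rw [if_neg h1]
          by_cases h2 : 1 + (rx.takeWhile (· == a)).length = 1 + (rs.takeWhile (· == a)).length
          · rw [if_pos h2, hrec, cmpB, if_pos ⟨rfl, by omega, by omega⟩]
          · rw [if_neg h2]
            by_cases h3 : 1 + (rs.takeWhile (· == a)).length ≤ 2
            · rw [if_pos h3, cmpB, if_neg (by omega)]
            · rw [if_neg h3, hrec, cmpB, if_pos ⟨rfl, by omega, by omega⟩]
      · rw [if_pos hab, cmpB, if_neg (fun hc => hab hc.1)]
    next hij =>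
      split
      next hle =>
        rw [List.drop_eq_nil_of_le hle.1, List.drop_eq_nil_of_le hle.2, rle]
        rfl
      next hle =>
        rcases Nat.lt_or_ge i s.length with hi | hi
        · have hj : x.length ≤ j := by
            rcases Nat.lt_or_ge j x.length with h | h
            · exact absurd ⟨hi, h⟩ hij
            · exact h
          obtain ⟨a, rs, hs⟩ : ∃ a rs, s.drop i = a :: rs := by
            cases h : s.drop i with
            | nil =>
                exfalso
                have hl : (s.drop i).length = s.length - i := List.length_drop ..
                rw [h] at hl; simp at hl; omega
            | cons a rs => exact ⟨a, rs, rfl⟩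
          rw [List.drop_eq_nil_of_le hj, hs, rle, rle]
          rfl
        · have hj : j < x.length := by
            rcases Nat.lt_or_ge j x.length with h | h
            · exact h
            · exact absurd ⟨hi, h⟩ hle
          obtain ⟨b, rx, hx⟩ : ∃ b rx, x.drop j = b :: rx := by
            cases h : x.drop j with
            | nil =>
                exfalso
                have hl : (x.drop j).length = x.length - j := List.length_drop ..
                rw [h] at hl; simp at hl; omega
            | cons b rx => exact ⟨b, rx, rfl⟩
          rw [List.drop_eq_nil_of_le hi, hx, rle, rle]
          rfl

-- ===== greedy-side lemmas =====

theorem greedyGo_nil (s x : List Char) (i j : Nat) (hi : s.length ≤ i) :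
    greedyGo s x (s.drop i) i j = if j = x.length then 1 else 0 := by
  rw [List.drop_eq_nil_of_le hi, greedyGo]

theorem greedyGo_cons (s x : List Char) (i j : Nat) (hi : i < s.length) :
    greedyGo s x (s.drop i) i j =
      (if j < x.length ∧ s.getD i ' ' = x.getD j ' ' then greedyGo s x (s.drop (i+1)) (i+1) (j+1)
       else if 2 ≤ i ∧ s.getD i ' ' = s.getD (i-1) ' ' ∧ s.getD (i-1) ' ' = s.getD (i-2) ' ' then
         greedyGo s x (s.drop (i+1)) (i+1) j
       else if 1 ≤ i ∧ i + 1 < s.length ∧ s.getD (i-1) ' ' = s.getD i ' ' ∧ s.getD i ' ' = s.getD (i+1) ' ' then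
         greedyGo s x (s.drop (i+1)) (i+1) j
       else 0) := by
  rw [List.drop_eq_getElem_cons hi, greedyGo]

-- phase 1: matching positions are consumed pairwise
theorem consume (s x : List Char) : ∀ (t i j : Nat),
    (∀ q, q < t → i + q < s.length ∧ j + q < x.length ∧ s.getD (i+q) ' ' = x.getD (j+q) ' ') →
    greedyGo s x (s.drop i) i j = greedyGo s x (s.drop (i+t)) (i+t) (j+t)
  | 0, i, j, _ => by simp
  | t+1, i, j, h => by
      obtain ⟨hi, hj, he⟩ := h 0 (by omega)
      simp only [Nat.add_zero] at hi hj he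
      rw [greedyGo_cons s x i j hi, if_pos ⟨hj, he⟩,
        consume s x t (i+1) (j+1) (fun q hq => by
          have := h (q+1) (by omega)
          constructor
          · omega
          constructor
          · omega
          · have e1 : i + 1 + q = i + (q + 1) := by omega
            have e2 : j + 1 + q = j + (q + 1) := by omega
            rw [e1, e2]; exact this.2.2)]
      have e1 : i + 1 + t = i + (t + 1) := by omega
      have e2 : j + 1 + t = j + (t + 1) := by omega
      rw [e1, e2]

-- phase 2 (k ≥ 2): inside a run, an unmatched position passes via the backward window
theorem skip2 (s x : List Char) (a : Char) (i j' n : Nat)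
    (hrun : ∀ k, k < n → s.getD (i+k) ' ' = a)
    (hend : i + n ≤ s.length)
    (hxf : j' < x.length → x.getD j' ' ' ≠ a)
    (k : Nat) (hk2 : 2 ≤ k) (hkn : k ≤ n) :
    greedyGo s x (s.drop (i+k)) (i+k) j' = greedyGo s x (s.drop (i+n)) (i+n) j' := by
  rcases eq_or_lt_of_le hkn with h | h
  · rw [h]
  · have hik : i + k < s.length := by omega
    have ha0 : s.getD (i+k) ' ' = a := hrun k h
    have ha1 : s.getD (i+k-1) ' ' = a := by
      rw [show i + k - 1 = i + (k-1) by omega]; exact hrun (k-1) (by omega)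
    have ha2 : s.getD (i+k-2) ' ' = a := by
      rw [show i + k - 2 = i + (k-2) by omega]; exact hrun (k-2) (by omega)
    have e1 : greedyGo s x (s.drop (i+k)) (i+k) j' = greedyGo s x (s.drop (i+k+1)) (i+k+1) j' := by
      rw [greedyGo_cons s x (i+k) j' hik,
        if_neg (fun hc => hxf hc.1 (by rw [← hc.2, ha0])),
        if_pos ⟨by omega, by rw [ha0, ha1], by rw [ha1, ha2]⟩]
    rw [e1, show i + k + 1 = i + (k+1) by omega,
      skip2 s x a i j' n hrun hend hxf (k+1) (by omega) (by omega)]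
termination_by n - k

-- entry step for k = 1 when the run has length ≥ 3: the forward window applies
theorem skip1 (s x : List Char) (a : Char) (i j' n : Nat)
    (hrun : ∀ k, k < n → s.getD (i+k) ' ' = a)
    (hend : i + n ≤ s.length)
    (hxf : j' < x.length → x.getD j' ' ' ≠ a)
    (hprev : i = 0 ∨ s.getD (i-1) ' ' ≠ a)
    (h3 : 3 ≤ n) :
    greedyGo s x (s.drop (i+1)) (i+1) j' = greedyGo s x (s.drop (i+2)) (i+2) j' := by
  have hik : i + 1 < s.length := by omega
  have ha0 : s.getD i ' ' = a := by have := hrun 0 (by omega); simpa using this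
  have ha1 : s.getD (i+1) ' ' = a := hrun 1 (by omega)
  have ha2 : s.getD (i+2) ' ' = a := hrun 2 (by omega)
  have hc2 : ¬(2 ≤ i + 1 ∧ s.getD (i+1) ' ' = s.getD (i+1-1) ' '
      ∧ s.getD (i+1-1) ' ' = s.getD (i+1-2) ' ') := by
    rintro ⟨h2i, he1, he2⟩
    rcases hprev with h0 | hne
    · omega
    · rw [show i + 1 - 1 = i by omega, show i + 1 - 2 = i - 1 by omega] at he2
      exact hne (by rw [← he2, ha0])
  have hc3 : 1 ≤ i + 1 ∧ i + 1 + 1 < s.length ∧ s.getD (i+1-1) ' ' = s.getD (i+1) ' '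
      ∧ s.getD (i+1) ' ' = s.getD (i+1+1) ' ' := by
    refine ⟨by omega, by omega, ?_, ?_⟩
    · rw [show i + 1 - 1 = i by omega, ha0, ha1]
    · rw [ha1, show i + 1 + 1 = i + 2 by omega, ha2]
  rw [greedyGo_cons s x (i+1) j' hik,
    if_neg (fun hc => hxf hc.1 (by rw [← hc.2, ha1])),
    if_neg hc2, if_pos hc3]

-- failure when the first position of the run is unmatched (m = 0)
theorem fail0 (s x : List Char) (a : Char) (i j n : Nat)
    (hrun : ∀ k, k < n → s.getD (i+k) ' ' = a)
    (hn : 1 ≤ n) (hend : i + n ≤ s.length)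
    (hxf : j < x.length → x.getD j ' ' ≠ a)
    (hprev : i = 0 ∨ s.getD (i-1) ' ' ≠ a) :
    greedyGo s x (s.drop i) i j = 0 := by
  have ha0 : s.getD i ' ' = a := by have := hrun 0 (by omega); simpa using this
  have hc2 : ¬(2 ≤ i ∧ s.getD i ' ' = s.getD (i-1) ' '
      ∧ s.getD (i-1) ' ' = s.getD (i-2) ' ') := by
    rintro ⟨h2i, he1, _⟩
    rcases hprev with h0 | hne
    · omega
    · exact hne (by rw [← he1, ha0])
  have hc3 : ¬(1 ≤ i ∧ i + 1 < s.length ∧ s.getD (i-1) ' ' = s.getD i ' '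
      ∧ s.getD i ' ' = s.getD (i+1) ' ') := by
    rintro ⟨h1i, _, he1, _⟩
    rcases hprev with h0 | hne
    · omega
    · exact hne (by rw [he1, ha0])
  rw [greedyGo_cons s x i j (by omega),
    if_neg (fun hc => hxf hc.1 (by rw [← hc.2, ha0])),
    if_neg hc2, if_neg hc3]

-- failure at the single unmatched position of a run of length 2 (m = 1, n = 2)
theorem fail_n2 (s x : List Char) (a : Char) (i j' : Nat)
    (hrun : ∀ k, k < 2 → s.getD (i+k) ' ' = a)
    (hend : i + 2 ≤ s.length)
    (hxf : j' < x.length → x.getD j' ' ' ≠ a)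
    (hprev : i = 0 ∨ s.getD (i-1) ' ' ≠ a)
    (hbnd : i + 2 < s.length → s.getD (i+2) ' ' ≠ a) :
    greedyGo s x (s.drop (i+1)) (i+1) j' = 0 := by
  have ha0 : s.getD i ' ' = a := by have := hrun 0 (by omega); simpa using this
  have ha1 : s.getD (i+1) ' ' = a := hrun 1 (by omega)
  have hc2 : ¬(2 ≤ i + 1 ∧ s.getD (i+1) ' ' = s.getD (i+1-1) ' '
      ∧ s.getD (i+1-1) ' ' = s.getD (i+1-2) ' ') := by
    rintro ⟨h2i, he1, he2⟩
    rcases hprev with h0 | hne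
    · omega
    · rw [show i + 1 - 1 = i by omega, show i + 1 - 2 = i - 1 by omega] at he2
      exact hne (by rw [← he2, ha0])
  have hc3 : ¬(1 ≤ i + 1 ∧ i + 1 + 1 < s.length ∧ s.getD (i+1-1) ' ' = s.getD (i+1) ' '
      ∧ s.getD (i+1) ' ' = s.getD (i+1+1) ' ') := by
    rintro ⟨_, hlt, _, he2⟩
    rw [show i + 1 + 1 = i + 2 by omega] at hlt he2
    exact hbnd hlt (by rw [← he2, ha1])
  rw [greedyGo_cons s x (i+1) j' (by omega),
    if_neg (fun hc => hxf hc.1 (by rw [← hc.2, ha1])),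
    if_neg hc2, if_neg hc3]

-- failure after the whole run is consumed but x's run continues (m > n)
theorem fail_mgtn (s x : List Char) (a : Char) (i j'' n : Nat)
    (hrun : ∀ k, k < n → s.getD (i+k) ' ' = a)
    (hn : 1 ≤ n) (hend : i + n ≤ s.length)
    (hbnd : i + n < s.length → s.getD (i+n) ' ' ≠ a)
    (hjlt : j'' < x.length) (hxa : x.getD j'' ' ' = a) :
    greedyGo s x (s.drop (i+n)) (i+n) j'' = 0 := by
  rcases eq_or_lt_of_le hend with heq | hlt
  · rw [greedyGo_nil s x (i+n) j'' (by omega), if_neg (by omega)]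
  · have hb : s.getD (i+n) ' ' ≠ a := hbnd hlt
    have ha1 : s.getD (i+n-1) ' ' = a := by
      rw [show i + n - 1 = i + (n-1) by omega]; exact hrun (n-1) (by omega)
    have hc2 : ¬(2 ≤ i + n ∧ s.getD (i+n) ' ' = s.getD (i+n-1) ' '
        ∧ s.getD (i+n-1) ' ' = s.getD (i+n-2) ' ') := by
      rintro ⟨_, he1, _⟩
      exact hb (by rw [he1, ha1])
    have hc3 : ¬(1 ≤ i + n ∧ i + n + 1 < s.length ∧ s.getD (i+n-1) ' ' = s.getD (i+n) ' '
        ∧ s.getD (i+n) ' ' = s.getD (i+n+1) ' ') := by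
      rintro ⟨_, _, he1, _⟩
      exact hb (by rw [← he1, ha1])
    rw [greedyGo_cons s x (i+n) j'' hlt,
      if_neg (fun hc => hb (by rw [hc.2, hxa])),
      if_neg hc2, if_neg hc3]

-- B's greedy scan computes the run comparison
theorem greedy_eq (s x : List Char) (i j : Nat) (hj : j ≤ x.length)
    (hprev : ∀ a rs, s.drop i = a :: rs → i = 0 ∨ s.getD (i-1) ' ' ≠ a) :
    greedyGo s x (s.drop i) i j = cmpB (rle (s.drop i)) (rle (x.drop j)) := by
  have hslen : (s.drop i).length = s.length - i := List.length_drop ..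
  have hxlen : (x.drop j).length = x.length - j := List.length_drop ..
  cases hsd : s.drop i with
  | nil =>
      rw [hsd] at hslen
      have hile : s.length ≤ i := by simp at hslen; omega
      rw [← hsd, greedyGo_nil s x i j (by omega), hsd, rle]
      cases hxd : x.drop j with
      | nil =>
          rw [hxd] at hxlen
          have : j = x.length := by simp at hxlen; omega
          rw [if_pos this, rle]
          rfl
      | cons b rx =>
          rw [hxd] at hxlen
          have : j < x.length := by simp at hxlen; omega
          rw [if_neg (by omega), rle]
          rfl
  | cons a rs =>
      rw [hsd] at hslen
      simp only [List.length_cons] at hslen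
      rw [← hsd]
      have hKle : (rs.takeWhile (· == a)).length ≤ rs.length :=
        (List.takeWhile_prefix _).length_le
      -- n := K + 1 is the length of the leading run of s.drop i
      set K := (rs.takeWhile (· == a)).length with hK
      have hendS : i + (K + 1) ≤ s.length := by omega
      have hrun : ∀ k, k < K + 1 → s.getD (i+k) ' ' = a := by
        intro k hk
        rw [getD_drop s (a :: rs) i k hsd, getD_run_list rs a k (by omega)]
      have hdropS : s.drop (i + (K + 1)) = rs.dropWhile (· == a) := by
        have h1 : List.drop (K + 1) (s.drop i) = s.drop (i + (K + 1)) := List.drop_drop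
        rw [hsd] at h1
        simp only [List.drop_succ_cons] at h1
        rw [← h1, hK, drop_tw]
      have hbnd : i + (K + 1) < s.length → s.getD (i + (K + 1)) ' ' ≠ a := by
        intro hlt
        have hne : rs.dropWhile (· == a) ≠ [] := by
          intro hnil
          have := List.length_drop (l := s) (i := i + (K + 1))
          rw [hdropS, hnil] at this
          simp at this; omega
        have := getD_drop s (rs.dropWhile (· == a)) (i + (K+1)) 0 hdropS
        simp only [Nat.add_zero] at this
        rw [this]
        exact dropWhile_getD_ne a rs hne
      have hprev' : ∀ b rt, s.drop (i + (K+1)) = b :: rt →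
          i + (K+1) = 0 ∨ s.getD (i + (K+1) - 1) ' ' ≠ b := by
        intro b rt hbt
        right
        have hlt : i + (K+1) < s.length := by
          have := List.length_drop (l := s) (i := i + (K+1))
          rw [hbt] at this; simp at this; omega
        have hb : s.getD (i + (K+1)) ' ' = b := by
          have := getD_drop s (b :: rt) (i + (K+1)) 0 hbt
          simpa using this
        have hba : b ≠ a := fun hc => hbnd hlt (by rw [hb, hc])
        have : s.getD (i + (K+1) - 1) ' ' = a := by
          rw [show i + (K+1) - 1 = i + K by omega]; exact hrun K (by omega)
        rw [this]; exact fun hc => hba hc.symm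
      have hrleS : rle (s.drop i) = (a, 1 + K) :: rle (rs.dropWhile (· == a)) := by
        rw [hsd, rle]
      have hrec : ∀ j'', j'' ≤ x.length → x.drop j'' = x.drop j'' →
          greedyGo s x (s.drop (i + (K+1))) (i + (K+1)) j''
            = cmpB (rle (rs.dropWhile (· == a))) (rle (x.drop j'')) := by
        intro j'' hj'' _
        rw [greedy_eq s x (i + (K+1)) j'' hj'' hprev', hdropS]
      have hprev0 : i = 0 ∨ s.getD (i-1) ' ' ≠ a := hprev a rs hsd
      cases hxd : x.drop j with
      | nil =>
          rw [hxd] at hxlen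
          have hjx : j = x.length := by simp at hxlen; omega
          rw [← hxd]
          have hrleN : rle (x.drop j) = [] := by rw [hxd, rle]
          rw [fail0 s x a i j (K+1) hrun (by omega) hendS (by omega) hprev0,
            hrleS, hrleN, cmpB]
      | cons b rx =>
          rw [hxd] at hxlen
          simp only [List.length_cons] at hxlen
          rw [← hxd]
          have hjlt : j < x.length := by omega
          have hrleX0 : rle (x.drop j)
              = (b, 1 + (rx.takeWhile (· == b)).length) :: rle (rx.dropWhile (· == b)) := by
            rw [hxd, rle]
          by_cases hab : b = a
          · subst hab
            set Kx := (rx.takeWhile (· == b)).length with hKx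
            have hKxle : Kx ≤ rx.length := by
              have := (List.takeWhile_prefix (l := rx) (· == b)).length_le
              omega
            have hendX : j + (Kx + 1) ≤ x.length := by omega
            have hxrun : ∀ q, q < Kx + 1 → x.getD (j+q) ' ' = b := by
              intro q hq
              rw [getD_drop x (b :: rx) j q hxd, getD_run_list rx b q (by omega)]
            have hdropX : x.drop (j + (Kx + 1)) = rx.dropWhile (· == b) := by
              have h1 : List.drop (Kx + 1) (x.drop j) = x.drop (j + (Kx + 1)) := List.drop_drop
              rw [hxd] at h1
              simp only [List.drop_succ_cons] at h1
              rw [← h1, hKx, drop_tw]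
            have hxbnd : j + (Kx + 1) < x.length → x.getD (j + (Kx + 1)) ' ' ≠ b := by
              intro hlt
              have hne : rx.dropWhile (· == b) ≠ [] := by
                intro hnil
                have := List.length_drop (l := x) (i := j + (Kx + 1))
                rw [hdropX, hnil] at this
                simp at this; omega
              have := getD_drop x (rx.dropWhile (· == b)) (j + (Kx+1)) 0 hdropX
              simp only [Nat.add_zero] at this
              rw [this]
              exact dropWhile_getD_ne b rx hne
            -- t = min (K+1) (Kx+1) matching steps
            rcases Nat.lt_trichotomy K Kx with hKlt | hKeq | hKgt
            · -- m > n : consume the whole run of s, then fail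
              have hcons : greedyGo s x (s.drop i) i j = greedyGo s x (s.drop (i + (K+1))) (i + (K+1)) (j + (K+1)) :=
                consume s x (K+1) i j (fun q hq =>
                  ⟨by omega, by omega, by rw [hrun q hq, hxrun q (by omega)]⟩)
              rw [hcons,
                fail_mgtn s x b i (j + (K+1)) (K+1) hrun (by omega) hendS hbnd
                  (by omega) (hxrun (K+1) (by omega)),
                hrleS, hrleX0, cmpB, if_neg (by rintro ⟨_, hle, _⟩; omega)]
            · -- m = n : consume the run, recurse
              have hcons : greedyGo s x (s.drop i) i j = greedyGo s x (s.drop (i + (K+1))) (i + (K+1)) (j + (Kx+1)) := by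
                rw [consume s x (K+1) i j (fun q hq =>
                    ⟨by omega, by omega, by rw [hrun q hq, hxrun q (by omega)]⟩),
                  show j + (K+1) = j + (Kx+1) from by omega]
              rw [hcons, hrec (j + (Kx+1)) hendX rfl, hdropX,
                hrleS, hrleX0, cmpB, if_pos ⟨rfl, by omega, by omega⟩]
            · -- m < n : consume m, then skip to the end of the run (needs n ≥ 3 unless blocked)
              have hcons : greedyGo s x (s.drop i) i j = greedyGo s x (s.drop (i + (Kx+1))) (i + (Kx+1)) (j + (Kx+1)) :=
                consume s x (Kx+1) i j (fun q hq =>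
                  ⟨by omega, by omega, by rw [hrun q (by omega), hxrun q hq]⟩)
              have hxf : j + (Kx+1) < x.length → x.getD (j + (Kx+1)) ' ' ≠ b := hxbnd
              rcases Nat.lt_or_ge Kx 1 with hKx0 | hKx1
              · -- m = 1
                rw [show Kx + 1 = 1 from by omega] at hcons hxf hdropX
                rcases Nat.lt_or_ge K 2 with hK1 | hK2
                · -- n = 2
                  rw [hcons,
                    fail_n2 s x b i (j+1) (fun k hk => hrun k (by omega)) (by omega)
                      hxf hprev0 (fun hlt => by
                        have := hbnd (by omega)
                        rwa [show i + (K+1) = i + 2 from by omega] at this),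
                    hrleS, hrleX0, cmpB, if_neg (by rintro ⟨_, _, h | h⟩ <;> omega)]
                · -- n ≥ 3
                  rw [hcons,
                    skip1 s x b i (j+1) (K+1) hrun hendS hxf hprev0 (by omega),
                    skip2 s x b i (j+1) (K+1) hrun hendS hxf 2 (by omega) (by omega),
                    hrec (j+1) (by omega) rfl, hdropX,
                    hrleS, hrleX0, cmpB, if_pos ⟨rfl, by omega, by omega⟩]
              · -- m ≥ 2 (hence n ≥ 3)
                rw [hcons,
                  skip2 s x b i (j + (Kx+1)) (K+1) hrun hendS hxf (Kx+1) (by omega) (by omega),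
                  hrec (j + (Kx+1)) hendX rfl, hdropX,
                  hrleS, hrleX0, cmpB, if_pos ⟨rfl, by omega, by omega⟩]
          · -- first chars differ
            rw [fail0 s x a i j (K+1) hrun (by omega) hendS
                (fun _ => by
                  have : x.getD j ' ' = b := by
                    have := getD_drop x (b :: rx) j 0 hxd
                    simpa using this
                  rw [this]; exact fun hc => hab hc)
                hprev0,
              hrleS, hrleX0, cmpB, if_neg (by rintro ⟨hc, _⟩; exact hab hc.symm)]
termination_by s.length - i
decreasing_by
  all_goals omega

-- ===== VERDICT (by name: the statement is the Claim_ definition above) =====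
theorem check_spec : Claim_equal_check := by
  intro s x _
  unfold Spec_check check check_alt
  have hg : greedyGo s.toList x.toList (s.toList.drop 0) 0 0
      = cmpB (rle (s.toList.drop 0)) (rle (x.toList.drop 0)) :=
    greedy_eq s.toList x.toList 0 0 (by omega) (fun _ _ _ => Or.inl rfl)
  simp only [List.drop_zero] at hg
  rw [outer_eq s.toList x.toList (s.toList.length + 1) 0 0 (by omega)]
  simp only [List.drop_zero]
  rw [hg]
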